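-- pv_equiv track=rewrite | github.com/goldmann/docker-squash | squash/squash.py | _layers_to_squash
-- ===== SOURCE A (Python) =====
-- def _layers_to_squash(layers, from_layer):
--     """ Prepares a list of layer IDs that should be squashed """
--     to_squash = []
--
--     for l in reversed(layers):
--         if l == from_layer:
--             break
--
--         to_squash.append(l)
--
--     to_squash.reverse()
--
--     return to_squash
-- ===== SOURCE B (Python) =====
-- def _layers_to_squash(layers, from_layer):
--     """Split-point decomposition: everything after the LAST occurrence of from_layer."""
--     if from_layer in layers:
--         pos = len(layers) - 1 - layers[::-1].index(from_layer)
--         return list(layers[pos + 1:])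
--     return list(layers)
-- ===== Notes on version B (the rewrite author's own statement) =====
-- stated objective: simpler
-- what changed: Replaces the reversed-scan accumulate-then-reverse loop with a split-point decomposition: locate the last occurrence of from_layer and return the slice after it (or a copy of the whole list if absent).
import Mathlib
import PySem

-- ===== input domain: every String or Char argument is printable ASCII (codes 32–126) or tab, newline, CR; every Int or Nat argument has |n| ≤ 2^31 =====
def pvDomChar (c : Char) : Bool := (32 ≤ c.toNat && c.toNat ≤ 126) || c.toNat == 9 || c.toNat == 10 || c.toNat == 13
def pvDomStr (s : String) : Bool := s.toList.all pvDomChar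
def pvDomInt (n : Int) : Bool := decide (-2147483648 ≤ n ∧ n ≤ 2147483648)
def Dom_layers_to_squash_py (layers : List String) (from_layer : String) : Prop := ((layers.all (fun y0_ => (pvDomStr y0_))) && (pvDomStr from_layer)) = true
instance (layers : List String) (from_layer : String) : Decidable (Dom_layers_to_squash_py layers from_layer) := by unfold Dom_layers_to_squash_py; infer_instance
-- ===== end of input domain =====

-- B replaces A's reversed accumulate-then-reverse loop with a split-point slice after the last occurrence (objective: simpler).

-- ===== PORT A =====
-- the 'for l in reversed(layers): if l == from_layer: break; to_squash.append(l)' loop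
def pvGoA (from_layer : String) : List String → List String
  | [] => []
  | l :: rest => if l = from_layer then [] else l :: pvGoA from_layer rest

def layers_to_squash_py (layers : List String) (from_layer : String) : List String :=
  (pvGoA from_layer layers.reverse).reverse

-- ===== PORT B =====
def layers_to_squash_py_alt (layers : List String) (from_layer : String) : List String :=
  if layers.contains from_layer then
    match PySem.List.index? layers.reverse from_layer with
    | some j =>
        let pos : Int := (layers.length : Int) - 1 - (j : Int)
        PySem.List.slice layers (some (pos + 1)) none
    | none => []  -- unreachable: membership was checked
  else layers

-- ===== PRECONDITION & SPEC =====
def Spec_layers_to_squash_py (layers : List String) (from_layer : String) (out : List String) : Prop := out = layers_to_squash_py_alt layers from_layer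
instance (layers : List String) (from_layer : String) (out : List String) : Decidable (Spec_layers_to_squash_py layers from_layer out) := by unfold Spec_layers_to_squash_py; infer_instance

-- ===== CLAIM (what is proved, stated in full; the proofs are below) =====
def Claim_equal_layers_to_squash_py : Prop := ∀ (layers : List String) (from_layer : String), Dom_layers_to_squash_py layers from_layer → Spec_layers_to_squash_py layers from_layer (layers_to_squash_py layers from_layer)

-- ===== LEMMAS AND PROOFS =====
theorem pvGoA_all (from_layer : String) (l : List String) (h : from_layer ∉ l) :
    pvGoA from_layer l = l := by
  induction l with
  | nil => rfl
  | cons x t ih =>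
      have hx1 : x ≠ from_layer := fun hh => h (by simp [hh])
      have hx2 : from_layer ∉ t := fun hh => h (by simp [hh])
      simp [pvGoA, hx1, ih hx2]

theorem pvGoA_append (from_layer : String) (pre suf : List String) (hnot : from_layer ∉ pre) :
    pvGoA from_layer (pre ++ from_layer :: suf) = pre := by
  induction pre with
  | nil => simp [pvGoA]
  | cons x t ih =>
      have hx1 : x ≠ from_layer := fun hh => hnot (by simp [hh])
      have hx2 : from_layer ∉ t := fun hh => hnot (by simp [hh])
      simp [pvGoA, hx1, ih hx2]

theorem layers_to_squash_py_eq (layers : List String) (from_layer : String) :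
    layers_to_squash_py layers from_layer = layers_to_squash_py_alt layers from_layer := by
  unfold layers_to_squash_py layers_to_squash_py_alt
  by_cases hmem : from_layer ∈ layers
  · simp only [List.contains_iff_mem, hmem, if_pos]
    have hrev : from_layer ∈ layers.reverse := by simpa using hmem
    obtain ⟨j, hj⟩ := Option.isSome_iff_exists.mp ((PySem.List.index?_isSome_iff _ _).mpr hrev)
    obtain ⟨pre, suf, hsplit, hlen, hnot⟩ := (PySem.List.index?_eq_some_iff _ _ _).mp hj
    have hlayers : layers = suf.reverse ++ from_layer :: pre.reverse := by
      have h2 := congrArg List.reverse hsplit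
      simp at h2
      exact h2
    have hlenlay : layers.length = suf.length + 1 + pre.length := by
      rw [hlayers]; simp; omega
    rw [hj, hsplit, pvGoA_append from_layer pre suf hnot]
    show pre.reverse =
      PySem.List.slice layers (some ((layers.length : Int) - 1 - (j : Int) + 1)) none
    have hpos : ((layers.length : Int) - 1 - (j : Int) + 1) = ((suf.length + 1 : Nat) : Int) := by
      rw [hlenlay, ← hlen]; push_cast; ring
    rw [hpos, PySem.List.slice_from_natCast, hlayers]
    rw [show from_layer :: pre.reverse = [from_layer] ++ pre.reverse from rfl,
      ← List.append_assoc]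
    rw [show suf.length + 1 = (suf.reverse ++ [from_layer]).length by simp]
    rw [List.drop_left]
  · simp only [List.contains_iff_mem, hmem, if_neg, not_false_iff]
    have hnr : from_layer ∉ layers.reverse := by simpa using hmem
    rw [pvGoA_all from_layer layers.reverse hnr]
    simp

-- ===== VERDICT (by name: the statement is the Claim_ definition above) =====
theorem layers_to_squash_py_spec : Claim_equal_layers_to_squash_py := by
  intro layers from_layer _
  exact layers_to_squash_py_eq layers from_layer
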